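-- pv_equiv track=rewrite | github.com/ajohnson5/fpl_compare_app | app/fpl_api_getters.py | manager_gw_transfers_temp
-- ===== SOURCE A (Python) =====
-- def manager_gw_transfers_temp(gw: int, manager_id, transfers_list):
--     transfers_in = []
--
--     transfers_out = []
--
--     for transfer in transfers_list:
--         if transfer["event"] == 1:
--             transfers_in.append(transfer["element_in"])
--             transfers_out.append(transfer["element_out"])
--         elif transfer["event"] > 1:
--             return transfers_in, transfers_out
--
--     return transfers_in, transfers_out
-- ===== SOURCE B (Python) =====
-- def manager_gw_transfers_temp(gw: int, manager_id, transfers_list):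
--     # Take the prefix strictly before the first transfer with event > 1
--     # (A's early return), then filter the gameweek-1 transfers from it.
--     prefix = []
--     for t in transfers_list:
--         if t["event"] > 1:
--             break
--         prefix.append(t)
--     return (
--         [t["element_in"] for t in prefix if t["event"] == 1],
--         [t["element_out"] for t in prefix if t["event"] == 1],
--     )
-- ===== Notes on version B (the rewrite author's own statement) =====
-- stated objective: idiomatic
-- what changed: Replaces the single loop with two interleaved accumulators by a take-prefix-before-first-event>1 pass followed by two comprehensions filtering event==1, separating the early-stop concern from the selection.
import Mathlib
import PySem

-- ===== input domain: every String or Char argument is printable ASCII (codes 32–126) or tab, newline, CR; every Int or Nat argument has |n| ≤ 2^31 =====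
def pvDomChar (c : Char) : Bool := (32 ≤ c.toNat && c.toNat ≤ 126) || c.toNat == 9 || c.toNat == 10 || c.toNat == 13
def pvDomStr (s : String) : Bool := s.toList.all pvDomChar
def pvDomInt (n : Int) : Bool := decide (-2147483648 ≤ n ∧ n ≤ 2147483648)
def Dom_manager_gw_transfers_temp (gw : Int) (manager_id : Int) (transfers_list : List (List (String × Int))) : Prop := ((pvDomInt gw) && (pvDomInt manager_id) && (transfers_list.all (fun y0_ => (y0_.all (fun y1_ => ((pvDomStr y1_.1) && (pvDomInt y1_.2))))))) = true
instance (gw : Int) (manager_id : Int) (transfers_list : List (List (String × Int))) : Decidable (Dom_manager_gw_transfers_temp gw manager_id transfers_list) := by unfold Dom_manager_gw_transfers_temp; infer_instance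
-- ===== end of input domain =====

-- B separates A's single early-returning loop into a take-pfx-before-first-event>1 pass
-- followed by two event==1 filtering comprehensions (idiomatic decomposition; same cost).

-- ===== PORT A =====
-- A's loop: two accumulator lists, append on event == 1, early return on event > 1.
-- dict lookup t["event"] is first-match lookup; keys are present inside Pre_, so getD 0 is exact there.
def pvGoA : List (List (String × Int)) → List Int → List Int → List Int × List Int
  | [], ins, outs => (ins, outs)
  | t :: rest, ins, outs =>
    if (t.lookup "event").getD 0 = 1 then
      pvGoA rest (ins ++ [(t.lookup "element_in").getD 0]) (outs ++ [(t.lookup "element_out").getD 0])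
    else if (t.lookup "event").getD 0 > 1 then (ins, outs)
    else pvGoA rest ins outs

def manager_gw_transfers_temp (gw : Int) (manager_id : Int) (transfers_list : List (List (String × Int))) : List Int × List Int :=
  pvGoA transfers_list [] []

-- ===== PORT B =====
-- B: pfx strictly before the first transfer with event > 1, then two filter/map comprehensions.
def manager_gw_transfers_temp_alt (gw : Int) (manager_id : Int) (transfers_list : List (List (String × Int))) : List Int × List Int :=
  let pfx := transfers_list.takeWhile (fun t => !((t.lookup "event").getD 0 > 1))
  ((pfx.filter (fun t => (t.lookup "event").getD 0 = 1)).map (fun t => (t.lookup "element_in").getD 0),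
   (pfx.filter (fun t => (t.lookup "event").getD 0 = 1)).map (fun t => (t.lookup "element_out").getD 0))

-- ===== PRECONDITION & SPEC =====
-- Pre_ excludes exactly the inputs on which the Python raises KeyError: a transfer reached by the
-- loop (i.e. before any event > 1) missing the "event" key, or an event == 1 transfer missing
-- "element_in"/"element_out".  Both A and B raise on exactly these inputs.
def pvPreList : List (List (String × Int)) → Bool
  | [] => true
  | t :: rest =>
    match t.lookup "event" with
    | none => false
    | some e =>
      if e = 1 then (t.lookup "element_in").isSome && (t.lookup "element_out").isSome && pvPreList rest
      else if e > 1 then true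
      else pvPreList rest

def Pre_manager_gw_transfers_temp (gw : Int) (manager_id : Int) (transfers_list : List (List (String × Int))) : Prop :=
  pvPreList transfers_list = true
instance (gw : Int) (manager_id : Int) (transfers_list : List (List (String × Int))) : Decidable (Pre_manager_gw_transfers_temp gw manager_id transfers_list) := by unfold Pre_manager_gw_transfers_temp; infer_instance

def pvWitness_manager_gw_transfers_temp : Int × Int × (List (List (String × Int))) :=
  (1, 2, [[("event", 1), ("element_in", 5), ("element_out", 6)], [("event", 2)]])

def Spec_manager_gw_transfers_temp (gw : Int) (manager_id : Int) (transfers_list : List (List (String × Int))) (out : List Int × List Int) : Prop := out = manager_gw_transfers_temp_alt gw manager_id transfers_list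
instance (gw : Int) (manager_id : Int) (transfers_list : List (List (String × Int))) (out : List Int × List Int) : Decidable (Spec_manager_gw_transfers_temp gw manager_id transfers_list out) := by unfold Spec_manager_gw_transfers_temp; infer_instance

-- ===== CLAIM (what is proved, stated in full; the proofs are below) =====
def Claim_equal_manager_gw_transfers_temp : Prop := ∀ (gw : Int) (manager_id : Int) (transfers_list : List (List (String × Int))), Dom_manager_gw_transfers_temp gw manager_id transfers_list → Pre_manager_gw_transfers_temp gw manager_id transfers_list → Spec_manager_gw_transfers_temp gw manager_id transfers_list (manager_gw_transfers_temp gw manager_id transfers_list)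

-- ===== LEMMAS AND PROOFS =====
-- Loop invariant: A's loop appends B's filtered results to the accumulators.
theorem pvGoA_eq (ts : List (List (String × Int))) : ∀ (ins outs : List Int),
    pvGoA ts ins outs =
      (ins ++ ((ts.takeWhile (fun t => !((t.lookup "event").getD 0 > 1))).filter
          (fun t => (t.lookup "event").getD 0 = 1)).map (fun t => (t.lookup "element_in").getD 0),
       outs ++ ((ts.takeWhile (fun t => !((t.lookup "event").getD 0 > 1))).filter
          (fun t => (t.lookup "event").getD 0 = 1)).map (fun t => (t.lookup "element_out").getD 0)) := by
  induction ts with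
  | nil => intro ins outs; simp [pvGoA]
  | cons t rest ih =>
    intro ins outs
    by_cases h1 : (t.lookup "event").getD 0 = 1
    · simp [pvGoA, h1, ih, List.filter_cons]
    · by_cases h2 : (t.lookup "event").getD 0 > 1
      · simp [pvGoA, h1, h2]
      · simp [pvGoA, h1, h2, ih]

-- ===== VERDICT (by name: the statement is the Claim_ definition above) =====
theorem manager_gw_transfers_temp_spec : Claim_equal_manager_gw_transfers_temp := by
  intro gw manager_id transfers_list _ _
  unfold Spec_manager_gw_transfers_temp manager_gw_transfers_temp manager_gw_transfers_temp_alt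
  simp [pvGoA_eq]
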